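-- pv_equiv track=rewrite | github.com/ldydek/AGH-ASD | 500+ algorithms/Arrays/ex064.py | ex064
-- ===== SOURCE A (Python) =====
-- def ex064(tab):
--     n, ctr = len(tab), 0
--     k = sum(tab)
--     s1, s2 = [], []
--     k = k // 2
--     for x in range(n):
--         if ctr != k:
--             s1.append(tab[x])
--             ctr += tab[x]
--         else:
--             s2.append(tab[x])
--     return s1, s2
-- ===== SOURCE B (Python) =====
-- def ex064(tab):
--     # compute-split-then-slice: find the cut index m, then slice once
--     target = sum(tab) // 2
--     if target == 0:
--         m = 0
--     else:
--         m = len(tab)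
--         prefix = 0
--         for i, v in enumerate(tab):
--             prefix += v
--             if prefix == target:
--                 m = i + 1
--                 break
--     return tab[:m], tab[m:]
-- ===== Notes on version B (the rewrite author's own statement) =====
-- stated objective: simpler
-- what changed: Replaces A's stateful element-by-element append loop over range(n) with a compute-the-cut-index-then-slice decomposition: scan prefix sums for the first point equal to sum//2, then return tab[:m], tab[m:].
import Mathlib
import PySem

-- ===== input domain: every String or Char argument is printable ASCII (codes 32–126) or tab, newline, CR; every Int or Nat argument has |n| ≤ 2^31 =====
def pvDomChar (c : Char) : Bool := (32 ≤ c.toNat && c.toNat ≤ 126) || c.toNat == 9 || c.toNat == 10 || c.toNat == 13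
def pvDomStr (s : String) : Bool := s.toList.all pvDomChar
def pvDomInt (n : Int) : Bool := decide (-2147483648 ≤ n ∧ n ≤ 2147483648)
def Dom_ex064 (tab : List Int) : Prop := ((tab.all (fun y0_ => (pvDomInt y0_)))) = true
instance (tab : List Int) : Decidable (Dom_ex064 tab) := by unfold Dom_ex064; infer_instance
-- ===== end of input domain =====

-- B replaces A's element-by-element append loop by computing the cut index m first and slicing once (objective: simpler decomposition, same linear cost).

-- ===== PORT A =====
def ex064 (tab : List Int) : List Int × List Int :=
  let n : Int := (tab.length : Int)
  let k : Int := PySem.Int.floordiv tab.sum 2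
  let st :=
    (PySem.List.pyRange 0 n 1).foldl
      (fun (st : Int × List Int × List Int) x =>
        let v := PySem.List.pyGetD tab x 0
        if st.1 ≠ k then (st.1 + v, st.2.1 ++ [v], st.2.2)
        else (st.1, st.2.1, st.2.2 ++ [v]))
      (0, [], [])
  (st.2.1, st.2.2)

-- ===== PORT B =====
-- B's scan: absolute index of the first position (counting from i) where the running prefix hits target
def pvScanB (target : Int) (pfx : Int) (i : Nat) : List Int → Nat
  | [] => i
  | v :: rest => if pfx + v = target then i + 1 else pvScanB target (pfx + v) (i + 1) rest

def ex064_alt (tab : List Int) : List Int × List Int :=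
  let target : Int := PySem.Int.floordiv tab.sum 2
  let m : Nat := if target = 0 then 0 else pvScanB target 0 0 tab
  (tab.take m, tab.drop m)

-- ===== PRECONDITION & SPEC =====
def Spec_ex064 (tab : List Int) (out : List Int × List Int) : Prop := out = ex064_alt tab
instance (tab : List Int) (out : List Int × List Int) : Decidable (Spec_ex064 tab out) := by unfold Spec_ex064; infer_instance

-- ===== CLAIM (what is proved, stated in full; the proofs are below) =====
def Claim_equal_ex064 : Prop := ∀ (tab : List Int), Dom_ex064 tab → Spec_ex064 tab (ex064 tab)

-- ===== LEMMAS AND PROOFS =====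

-- A's loop as a fold over the elements themselves
def pvLoopA (k : Int) (st : Int × List Int × List Int) : List Int → Int × List Int × List Int
  | [] => st
  | v :: rest =>
      if st.1 ≠ k then pvLoopA k (st.1 + v, st.2.1 ++ [v], st.2.2) rest
      else pvLoopA k (st.1, st.2.1, st.2.2 ++ [v]) rest

-- relative cut index of A's loop
def pvScanA (k ctr : Int) : List Int → Nat
  | [] => 0
  | v :: rest => if ctr = k then 0 else pvScanA k (ctr + v) rest + 1

theorem foldl_eq_pvLoopA (k : Int) (l : List Int) (st : Int × List Int × List Int) :
    l.foldl (fun st v => if st.1 ≠ k then (st.1 + v, st.2.1 ++ [v], st.2.2)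
                         else (st.1, st.2.1, st.2.2 ++ [v])) st = pvLoopA k st l := by
  induction l generalizing st with
  | nil => rfl
  | cons v rest ih =>
      simp only [List.foldl_cons, pvLoopA]
      split_ifs with h <;> exact ih _

theorem pvLoopA_split (k : Int) (l : List Int) (ctr : Int) (s1 s2 : List Int) :
    (pvLoopA k (ctr, s1, s2) l).2 =
      (s1 ++ l.take (pvScanA k ctr l), s2 ++ l.drop (pvScanA k ctr l)) := by
  induction l generalizing ctr s1 s2 with
  | nil => simp [pvLoopA, pvScanA]
  | cons v rest ih =>
      by_cases h : ctr = k
      · -- stays equal forever: everything goes to s2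
        have stay : ∀ (m : List Int) (a b : List Int), (pvLoopA k (k, a, b) m).2 = (a, b ++ m) := by
          intro m
          induction m with
          | nil => intro a b; simp [pvLoopA]
          | cons w ws ihm => intro a b; simp [pvLoopA, ihm]
        subst h
        simp [pvLoopA, pvScanA, stay]
      · simp [pvLoopA, pvScanA, h, ih (ctr + v) (s1 ++ [v]) s2]

theorem pvScanB_eq (k : Int) (l : List Int) (ctr : Int) (i : Nat) (h : ctr ≠ k) :
    pvScanB k ctr i l = i + pvScanA k ctr l := by
  induction l generalizing ctr i with
  | nil => simp [pvScanB, pvScanA]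
  | cons v rest ih =>
      by_cases hv : ctr + v = k
      · have : pvScanA k k rest = 0 := by cases rest <;> simp [pvScanA]
        subst hv
        simp [pvScanB, pvScanA, h, this]
      · simp only [pvScanB, pvScanA, if_neg hv, if_neg h, ih (ctr + v) (i + 1) hv]
        omega

theorem pvScanA_eq_m (k : Int) (l : List Int) :
    pvScanA k 0 l = (if k = 0 then 0 else pvScanB k 0 0 l) := by
  by_cases hk : k = 0
  · subst hk
    cases l with
    | nil => simp [pvScanA]
    | cons v rest => simp [pvScanA]
  · rw [if_neg hk, pvScanB_eq k l 0 0 (by simpa using (Ne.symm hk))]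
    simp

-- ===== VERDICT (by name: the statement is the Claim_ definition above) =====
theorem ex064_spec : Claim_equal_ex064 := by
  unfold Claim_equal_ex064
  intro tab _
  unfold Spec_ex064 ex064 ex064_alt
  simp only []
  rw [PySem.List.foldl_pyRange_zero_pyGetD' tab 0
        (fun st v => if st.1 ≠ (PySem.Int.floordiv tab.sum 2) then (st.1 + v, st.2.1 ++ [v], st.2.2)
                     else (st.1, st.2.1, st.2.2 ++ [v])) (0, [], [])]
  rw [foldl_eq_pvLoopA, pvLoopA_split, pvScanA_eq_m]
  simp
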